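-- pv_equiv track=rewrite | github.com/Cyberdad247/Think-Tank | agentic_parser.py | _identify_enhancement_triggers
-- ===== SOURCE A (Python) =====
-- from typing import Dict, Any, List, Optional
--
-- def _identify_enhancement_triggers(
--
--     query: str,
--     augmented_context: Dict[str, Any]
-- ) -> List[str]:
--     """Identify enhancement triggers in the query and context"""
--     triggers = []
--
--     # Check for ethical considerations
--     if any(term in query.lower() for term in ["ethical", "moral", "right", "wrong"]):
--         triggers.append("ethical_guardrails")
--
--     # Check for recursive reasoning
--     if any(term in query.lower() for term in ["recursive", "iterative", "self-improve"]):
--         triggers.append("recursive_reasoning")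
--
--     # Check for emotional depth
--     if any(term in query.lower() for term in ["feel", "emotion", "sentiment"]):
--         triggers.append("ghost_axis_emotional")
--
--     return triggers
-- ===== SOURCE B (Python) =====
-- # Single left-to-right scan of the lowercased query: at each position, test which keyword
-- # starts there (keyword -> trigger map), marking triggers in a set; emit them in fixed order.
-- _KEYWORD_TO_TRIGGER = {
--     "ethical": "ethical_guardrails", "moral": "ethical_guardrails",
--     "right": "ethical_guardrails", "wrong": "ethical_guardrails",
--     "recursive": "recursive_reasoning", "iterative": "recursive_reasoning",
--     "self-improve": "recursive_reasoning",
--     "feel": "ghost_axis_emotional", "emotion": "ghost_axis_emotional",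
--     "sentiment": "ghost_axis_emotional",
-- }
-- _TRIGGER_ORDER = ["ethical_guardrails", "recursive_reasoning", "ghost_axis_emotional"]
--
-- def _identify_enhancement_triggers(query, augmented_context):
--     q = query.lower()
--     found = set()
--     for i in range(len(q) + 1):
--         for keyword, trigger in _KEYWORD_TO_TRIGGER.items():
--             if trigger not in found and q.startswith(keyword, i):
--                 found.add(trigger)
--     return [t for t in _TRIGGER_ORDER if t in found]
-- ===== Notes on version B (the rewrite author's own statement) =====
-- stated objective: alternative
-- what changed: Instead of A's three per-keyword 'term in query.lower()' substring tests, B scans the once-lowercased query left to right a single time, testing at each position which keyword of a keyword-to-trigger map starts there, marking matched triggers in a set and finally emitting them in a fixed order.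
import Mathlib
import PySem

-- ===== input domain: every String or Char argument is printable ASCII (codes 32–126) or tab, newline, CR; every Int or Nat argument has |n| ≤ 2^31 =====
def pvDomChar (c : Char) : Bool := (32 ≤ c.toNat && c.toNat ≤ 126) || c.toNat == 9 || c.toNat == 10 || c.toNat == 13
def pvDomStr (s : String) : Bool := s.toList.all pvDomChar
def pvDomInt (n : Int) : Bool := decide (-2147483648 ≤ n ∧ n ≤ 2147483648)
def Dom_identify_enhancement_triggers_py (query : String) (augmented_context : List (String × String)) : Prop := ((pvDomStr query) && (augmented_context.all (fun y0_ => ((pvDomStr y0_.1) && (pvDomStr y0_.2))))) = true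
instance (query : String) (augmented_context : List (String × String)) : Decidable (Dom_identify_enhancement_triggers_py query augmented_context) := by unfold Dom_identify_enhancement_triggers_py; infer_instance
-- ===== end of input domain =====

-- B replaces A's three per-keyword substring tests by a single left-to-right position scan of
-- the once-lowercased query against a keyword→trigger map, collecting triggers in a set
-- (objective: alternative — a different traversal, similar cost).


-- ===== PORT A =====
def identify_enhancement_triggers_py (query : String) (_augmented_context : List (String × String)) : List String :=
  let triggers : List String := []
  let triggers :=
    if (["ethical", "moral", "right", "wrong"].any
        (fun term => PySem.Str.isIn term (PySem.Str.lower query))) then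
      triggers ++ ["ethical_guardrails"] else triggers
  let triggers :=
    if (["recursive", "iterative", "self-improve"].any
        (fun term => PySem.Str.isIn term (PySem.Str.lower query))) then
      triggers ++ ["recursive_reasoning"] else triggers
  let triggers :=
    if (["feel", "emotion", "sentiment"].any
        (fun term => PySem.Str.isIn term (PySem.Str.lower query))) then
      triggers ++ ["ghost_axis_emotional"] else triggers
  triggers

-- ===== PORT B =====
-- Source B's _KEYWORD_TO_TRIGGER dict as an association list (insertion order)
def kwToTrigger : List (String × String) :=
  [("ethical", "ethical_guardrails"), ("moral", "ethical_guardrails"),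
   ("right", "ethical_guardrails"), ("wrong", "ethical_guardrails"),
   ("recursive", "recursive_reasoning"), ("iterative", "recursive_reasoning"),
   ("self-improve", "recursive_reasoning"),
   ("feel", "ghost_axis_emotional"), ("emotion", "ghost_axis_emotional"),
   ("sentiment", "ghost_axis_emotional")]

def triggerOrder : List String :=
  ["ethical_guardrails", "recursive_reasoning", "ghost_axis_emotional"]

-- the body of Source B's inner 'for keyword, trigger in _KEYWORD_TO_TRIGGER.items()' loop;
-- q.startswith(keyword, i) is exactly keyword.toList.isPrefixOf (q.drop i.toNat) for the
-- nonnegative i produced by range(len(q) + 1)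
def scanAt (q : List Char) (f : PySem.Set String) (i : Int) : PySem.Set String :=
  kwToTrigger.foldl
    (fun f p =>
      if (!(PySem.Set.contains f p.2)) && p.1.toList.isPrefixOf (q.drop i.toNat) then
        PySem.Set.add f p.2
      else f) f

-- 'for i in range(len(q) + 1): …' over found = set()
def foundTriggers (q : List Char) : PySem.Set String :=
  (PySem.List.pyRange 0 ((q.length : Int) + 1) 1).foldl (scanAt q) PySem.Set.empty

def identify_enhancement_triggers_py_alt (query : String) (_augmented_context : List (String × String)) : List String :=
  let q : List Char := PySem.Chars.lower query.toList
  let found := foundTriggers q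
  triggerOrder.filter (fun t => PySem.Set.contains found t)

-- ===== PRECONDITION & SPEC =====
def Spec_identify_enhancement_triggers_py (query : String) (augmented_context : List (String × String)) (out : List String) : Prop := out = identify_enhancement_triggers_py_alt query augmented_context
instance (query : String) (augmented_context : List (String × String)) (out : List String) : Decidable (Spec_identify_enhancement_triggers_py query augmented_context out) := by unfold Spec_identify_enhancement_triggers_py; infer_instance

-- ===== CLAIM (what is proved, stated in full; the proofs are below) =====
def Claim_equal_identify_enhancement_triggers_py : Prop := ∀ (query : String) (augmented_context : List (String × String)), Dom_identify_enhancement_triggers_py query augmented_context → Spec_identify_enhancement_triggers_py query augmented_context (identify_enhancement_triggers_py query augmented_context)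

-- ===== LEMMAS AND PROOFS =====

-- membership through one inner-loop pass (any table), by induction generalizing the set
theorem mem_scan_table (q : List Char) (i : Int) (table : List (String × String))
    (f : PySem.Set String) (t : String) :
    (t ∈ table.foldl
      (fun f p =>
        if (!(PySem.Set.contains f p.2)) && p.1.toList.isPrefixOf (q.drop i.toNat) then
          PySem.Set.add f p.2
        else f) f) ↔
    t ∈ f ∨ ∃ p ∈ table, p.1.toList.isPrefixOf (q.drop i.toNat) = true ∧ t = p.2 := by
  induction table generalizing f with
  | nil => simp
  | cons a l ih =>
    simp only [List.foldl_cons, ih, List.mem_cons]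
    by_cases hc : PySem.Set.contains f a.2 = true
    · have hmem : a.2 ∈ f := by simpa [PySem.Set.contains] using hc
      simp only [hc]
      constructor
      · rintro (h | ⟨p, hp, hpre, rfl⟩)
        · exact Or.inl h
        · exact Or.inr ⟨p, Or.inr hp, hpre, rfl⟩
      · rintro (h | ⟨p, (rfl | hp), hpre, rfl⟩)
        · exact Or.inl h
        · exact Or.inl hmem
        · exact Or.inr ⟨p, hp, hpre, rfl⟩
    · simp only [hc]
      by_cases hpre : a.1.toList.isPrefixOf (q.drop i.toNat) = true
      · simp only [hpre, Bool.not_false, Bool.true_and, if_true, PySem.Set.mem_add]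
        constructor
        · rintro (⟨h | rfl⟩ | ⟨p, hp, hpre', rfl⟩)
          · exact Or.inl h
          · exact Or.inr ⟨a, Or.inl rfl, hpre, rfl⟩
          · exact Or.inr ⟨p, Or.inr hp, hpre', rfl⟩
        · rintro (h | ⟨p, (rfl | hp), hpre', rfl⟩)
          · exact Or.inl (Or.inl h)
          · exact Or.inl (Or.inr rfl)
          · exact Or.inr ⟨p, hp, hpre', rfl⟩
      · simp only [hpre, Bool.and_false]
        constructor
        · rintro (h | ⟨p, hp, hpre', rfl⟩)
          · exact Or.inl h
          · exact Or.inr ⟨p, Or.inr hp, hpre', rfl⟩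
        · rintro (h | ⟨p, (rfl | hp), hpre', rfl⟩)
          · exact Or.inl h
          · exact absurd hpre' hpre
          · exact Or.inr ⟨p, hp, hpre', rfl⟩

theorem mem_scan_positions (q : List Char) (is : List Int) (f : PySem.Set String) (t : String) :
    (t ∈ is.foldl (scanAt q) f) ↔
    t ∈ f ∨ ∃ i ∈ is, ∃ p ∈ kwToTrigger,
      p.1.toList.isPrefixOf (q.drop i.toNat) = true ∧ t = p.2 := by
  induction is generalizing f with
  | nil => simp
  | cons j l ih =>
    simp only [List.foldl_cons, ih, scanAt, mem_scan_table, List.mem_cons]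
    constructor
    · rintro ((h | ⟨p, hp, hpre, rfl⟩) | ⟨i, hi, p, hp, hpre, rfl⟩)
      · exact Or.inl h
      · exact Or.inr ⟨j, Or.inl rfl, p, hp, hpre, rfl⟩
      · exact Or.inr ⟨i, Or.inr hi, p, hp, hpre, rfl⟩
    · rintro (h | ⟨i, (rfl | hi), p, hp, hpre, rfl⟩)
      · exact Or.inl (Or.inl h)
      · exact Or.inl (Or.inr ⟨p, hp, hpre, rfl⟩)
      · exact Or.inr ⟨i, hi, p, hp, hpre, rfl⟩

-- a keyword is found at some scan position iff it is a substring ('kw in q')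
theorem exists_pos_prefix_iff_isIn (q kw : List Char) :
    (∃ i ∈ PySem.List.pyRange 0 ((q.length : Int) + 1) 1,
      kw.isPrefixOf (q.drop i.toNat) = true) ↔ PySem.Chars.isIn kw q = true := by
  rw [← PySem.Chars.exists_prefix_drop_iff_isIn]
  constructor
  · rintro ⟨i, _, hp⟩
    exact ⟨i.toNat, List.isPrefixOf_iff_prefix.mp hp⟩
  · rintro ⟨j, hp⟩
    refine ⟨((min j q.length : Nat) : Int), ?_, ?_⟩
    · rw [PySem.List.mem_pyRange_one]
      constructor
      · positivity
      · have : min j q.length ≤ q.length := min_le_right _ _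
        exact_mod_cast Nat.lt_succ_of_le this
    · rw [Int.toNat_natCast]
      by_cases hj : j ≤ q.length
      · rw [min_eq_left hj]
        exact List.isPrefixOf_iff_prefix.mpr hp
      · have h1 : q.drop j = [] := List.drop_eq_nil_of_le (by omega)
        have h2 : kw = [] := List.prefix_nil.mp (h1 ▸ hp)
        simp [h2]

theorem mem_foundTriggers (q : List Char) (t : String) :
    t ∈ foundTriggers q ↔
    ∃ p ∈ kwToTrigger, PySem.Chars.isIn p.1.toList q = true ∧ t = p.2 := by
  unfold foundTriggers
  rw [mem_scan_positions]
  simp only [PySem.Set.empty, List.not_mem_nil, false_or]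
  constructor
  · rintro ⟨i, hi, p, hp, hpre, rfl⟩
    exact ⟨p, hp, (exists_pos_prefix_iff_isIn q p.1.toList).mp ⟨i, hi, hpre⟩, rfl⟩
  · rintro ⟨p, hp, hin, rfl⟩
    obtain ⟨i, hi, hpre⟩ := (exists_pos_prefix_iff_isIn q p.1.toList).mpr hin
    exact ⟨i, hi, p, hp, hpre, rfl⟩

-- contains on the found set, per trigger, equals A's any-of-keywords test
theorem contains_found_eq (q : List Char) (t : String) :
    PySem.Set.contains (foundTriggers q) t =
    kwToTrigger.any (fun p => decide (p.2 = t) && PySem.Chars.isIn p.1.toList q) := by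
  rw [Bool.eq_iff_iff]
  simp only [PySem.Set.contains, List.contains_iff_mem, mem_foundTriggers,
    List.any_eq_true, Bool.and_eq_true, decide_eq_true_eq]
  constructor
  · rintro ⟨p, hp, hin, rfl⟩; exact ⟨p, hp, rfl, hin⟩
  · rintro ⟨p, hp, rfl, hin⟩; exact ⟨p, hp, hin, rfl⟩

-- ===== VERDICT (by name: the statement is the Claim_ definition above) =====
theorem identify_enhancement_triggers_py_spec : Claim_equal_identify_enhancement_triggers_py := by
  intro query _ _
  unfold Spec_identify_enhancement_triggers_py identify_enhancement_triggers_py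
    identify_enhancement_triggers_py_alt
  have hq : (PySem.Str.lower query).toList = PySem.Chars.lower query.toList := by simp
  set q : List Char := PySem.Chars.lower query.toList with hqdef
  have hA1 : (["ethical", "moral", "right", "wrong"].any
      (fun term => PySem.Str.isIn term (PySem.Str.lower query))) =
      PySem.Set.contains (foundTriggers q) "ethical_guardrails" := by
    rw [contains_found_eq q "ethical_guardrails"]
    simp only [kwToTrigger, List.any_cons, List.any_nil, PySem.Str.isIn_eq, hq]
    rfl
  have hA2 : (["recursive", "iterative", "self-improve"].any
      (fun term => PySem.Str.isIn term (PySem.Str.lower query))) =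
      PySem.Set.contains (foundTriggers q) "recursive_reasoning" := by
    rw [contains_found_eq q "recursive_reasoning"]
    simp only [kwToTrigger, List.any_cons, List.any_nil, PySem.Str.isIn_eq, hq]
    rfl
  have hA3 : (["feel", "emotion", "sentiment"].any
      (fun term => PySem.Str.isIn term (PySem.Str.lower query))) =
      PySem.Set.contains (foundTriggers q) "ghost_axis_emotional" := by
    rw [contains_found_eq q "ghost_axis_emotional"]
    simp only [kwToTrigger, List.any_cons, List.any_nil, PySem.Str.isIn_eq, hq]
    rfl
  simp only [hA1, hA2, hA3, triggerOrder, List.filter_cons, List.filter_nil]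
  cases PySem.Set.contains (foundTriggers q) "ethical_guardrails" <;>
    cases PySem.Set.contains (foundTriggers q) "recursive_reasoning" <;>
    cases PySem.Set.contains (foundTriggers q) "ghost_axis_emotional" <;> rfl
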